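-- pv_equiv track=rewrite | github.com/joshcutts/Advent-of-Code | day_10/day10_part2.py | most_constrained
-- ===== SOURCE A (Python) =====
-- def most_constrained(difference, buttons):
--     # index that appears in buttons least frequently
--     counts = {}
--     for button in buttons:
--
--         for b in button:
--             if b in counts:
--                 counts[b] += 1
--             else:
--                 counts[b] = 1
--
--     min_count = min(counts.values())
--     min_indices = [k for k,v in counts.items() if v == min_count]
--     return min_indices
-- ===== SOURCE B (Python) =====
-- def most_constrained(difference, buttons):
--     # Sort-and-scan instead of a counting dictionary: flatten once, sort, read
--     # off frequencies as run lengths of the sorted list, then emit the distinct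
--     # indices (first-occurrence order) whose run length is minimal.
--     flat = [x for button in buttons for x in button]
--     s = sorted(flat)
--     runs = []  # (value, run length) for each maximal run of equal values
--     i = 0
--     while i < len(s):
--         j = i
--         while j < len(s) and s[j] == s[i]:
--             j += 1
--         runs.append((s[i], j - i))
--         i = j
--     best = min(c for _, c in runs)
--     rare = {v for v, c in runs if c == best}
--     return [x for x in dict.fromkeys(flat) if x in rare]
-- ===== Notes on version B (the rewrite author's own statement) =====
-- stated objective: alternative
-- what changed: B replaces A's incrementally updated counting dictionary by sort-and-scan: it flattens the buttons, sorts the flat list, reads each index's frequency off as the length of its run of equal values, takes the minimal run length, and emits the distinct indices in first-occurrence order whose run length is minimal.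
import Mathlib
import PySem

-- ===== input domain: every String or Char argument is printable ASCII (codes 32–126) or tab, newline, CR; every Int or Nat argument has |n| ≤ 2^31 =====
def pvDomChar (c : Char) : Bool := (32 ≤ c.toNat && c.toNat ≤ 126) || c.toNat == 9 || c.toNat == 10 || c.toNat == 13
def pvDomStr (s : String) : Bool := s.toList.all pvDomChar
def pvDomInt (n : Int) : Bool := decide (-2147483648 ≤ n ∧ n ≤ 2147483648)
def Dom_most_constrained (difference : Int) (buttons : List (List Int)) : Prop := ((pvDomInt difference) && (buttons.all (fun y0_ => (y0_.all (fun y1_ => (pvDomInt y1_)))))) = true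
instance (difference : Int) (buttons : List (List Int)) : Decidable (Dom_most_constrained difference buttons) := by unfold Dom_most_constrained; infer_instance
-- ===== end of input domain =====

-- B replaces A's counting dictionary by sort-and-scan: frequencies are run lengths
-- of the sorted flat list; output keeps first-occurrence order ("alternative").

-- ===== PORT A =====
def most_constrained (difference : Int) (buttons : List (List Int)) : List Int :=
  let counts : PySem.Dict Int Int :=
    buttons.foldl (fun counts button =>
      button.foldl (fun counts b =>
        if counts.contains b then counts.insert b (counts.getD b 0 + 1)
        else counts.insert b 1) counts) PySem.Dict.empty
  match PySem.List.min? counts.values (fun v => v) with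
  | none => []  -- Python: min() on an empty sequence raises ValueError; excluded by Pre_
  | some min_count => (counts.items.filter (fun kv => kv.2 == min_count)).map Prod.fst

-- ===== PORT B =====
-- the index-based while loop of Source B: scan j forward over the run of s[i], emit (s[i], j-i), continue at j
def pvRunsOf : List Int → List (Int × Int)
  | [] => []
  | v :: t =>
    (v, (1 + (t.takeWhile (fun y => y == v)).length : Int)) ::
      pvRunsOf (t.dropWhile (fun y => y == v))
termination_by s => s.length
decreasing_by simpa using Nat.lt_succ_of_le (t.length_dropWhile_le _)

def most_constrained_alt (difference : Int) (buttons : List (List Int)) : List Int :=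
  let flat := buttons.flatMap (fun button => button)
  let s := PySem.List.sorted flat (fun x => x) false
  let runs := pvRunsOf s
  match PySem.List.min? (runs.map Prod.snd) (fun v => v) with
  | none => []  -- Python: min() on an empty generator raises ValueError; excluded by Pre_
  | some best =>
    let rare : PySem.Set Int :=
      PySem.Set.ofList ((runs.filter (fun vc => vc.2 == best)).map Prod.fst)
    (PySem.List.dedup flat).filter (fun x => PySem.Set.contains rare x)

-- ===== PRECONDITION & SPEC =====
-- Pre_ excludes exactly the inputs with no index at all (every button empty), on which
-- Python's A raises ValueError from min() on an empty sequence.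
def Pre_most_constrained (difference : Int) (buttons : List (List Int)) : Prop :=
  buttons.flatten ≠ []
instance (difference : Int) (buttons : List (List Int)) : Decidable (Pre_most_constrained difference buttons) := by unfold Pre_most_constrained; infer_instance

def pvWitness_most_constrained : Int × List (List Int) := (2, [[1, 2], [2, 3]])

def Spec_most_constrained (difference : Int) (buttons : List (List Int)) (out : List Int) : Prop := out = most_constrained_alt difference buttons
instance (difference : Int) (buttons : List (List Int)) (out : List Int) : Decidable (Spec_most_constrained difference buttons out) := by unfold Spec_most_constrained; infer_instance

-- ===== CLAIM (what is proved, stated in full; the proofs are below) =====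
def Claim_equal_most_constrained : Prop := ∀ (difference : Int) (buttons : List (List Int)), Dom_most_constrained difference buttons → Pre_most_constrained difference buttons → Spec_most_constrained difference buttons (most_constrained difference buttons)

-- ===== LEMMAS AND PROOFS =====

-- A's guarded counting step is the unconditional insert-with-getD step.
lemma stepA_eq (d : PySem.Dict Int Int) (b : Int) :
    (if d.contains b then d.insert b (d.getD b 0 + 1) else d.insert b 1) =
    d.insert b (d.getD b 0 + 1) := by
  by_cases h : d.contains b = true
  · simp [h]
  · have h' : d.contains b = false := by simpa using h
    rw [if_neg (by simp [h']), PySem.Dict.getD_of_not_contains d 0 h']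
    norm_num

-- A's counting loop builds Counter(flatten buttons)
lemma countsA_eq_counter (buttons : List (List Int)) :
    buttons.foldl (fun counts button =>
      button.foldl (fun counts b =>
        if counts.contains b then counts.insert b (counts.getD b 0 + 1)
        else counts.insert b 1) counts) PySem.Dict.empty
    = PySem.Dict.counter buttons.flatten := by
  rw [← PySem.Dict.foldl_insert_getD_add_one_eq_counter, List.foldl_flatten]
  exact PySem.List.foldl_congr_mem _ _ _ _ (fun acc button _ =>
    PySem.List.foldl_congr_mem _ _ _ _ (fun d b _ => stepA_eq d b))

-- on a ≤-sorted v :: t, every element after the leading run of v is > v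
lemma gt_of_mem_dropWhile (v : Int) (t : List Int)
    (h : (v :: t).Pairwise (· ≤ ·)) (y : Int)
    (hy : y ∈ t.dropWhile (fun z => z == v)) : v < y := by
  have ht : t.Pairwise (· ≤ ·) := h.of_cons
  have hvt : ∀ z ∈ t, v ≤ z := fun z hz => List.rel_of_pairwise_cons h hz
  cases hr : t.dropWhile (fun z => z == v) with
  | nil => simp [hr] at hy
  | cons w r =>
    have hw := List.head?_dropWhile_not (fun z => z == v) t
    rw [hr] at hw
    simp only [List.head?_cons] at hw
    have hwne : w ≠ v := by simpa using hw
    have hwv : v < w := by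
      have h1 : v ≤ w := hvt w ((t.dropWhile_sublist (fun z => z == v)).mem (by rw [hr]; exact List.mem_cons_self))
      omega
    rw [hr] at hy
    rcases List.mem_cons.mp hy with rfl | hy'
    · exact hwv
    · have hrp : (w :: r).Pairwise (· ≤ ·) := by
        rw [← hr]; exact ht.sublist (t.dropWhile_sublist _)
      have := List.rel_of_pairwise_cons hrp hy'
      omega

-- count of the head value of a sorted list is 1 + the leading-run length
lemma count_head_sorted (v : Int) (t : List Int)
    (hs : (v :: t).Pairwise (· ≤ ·)) :
    (v :: t).count v = 1 + (t.takeWhile (fun y => y == v)).length := by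
  have htake : ∀ y ∈ t.takeWhile (fun z => z == v), y = v := by
    intro y hy; simpa using List.mem_takeWhile_imp hy
  have hsplit : t = t.takeWhile (fun y => y == v) ++ t.dropWhile (fun y => y == v) :=
    (t.takeWhile_append_dropWhile).symm
  have h1 : (t.takeWhile (fun y => y == v)).count v =
      (t.takeWhile (fun y => y == v)).length :=
    List.count_eq_length.mpr (fun b hb => (htake b hb).symm)
  have h2 : (t.dropWhile (fun y => y == v)).count v = 0 :=
    List.count_eq_zero.mpr (fun hmem' => by
      have := gt_of_mem_dropWhile v t hs v hmem'; omega)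
  have h3 : t.count v = (t.takeWhile (fun y => y == v)).count v +
      (t.dropWhile (fun y => y == v)).count v := by
    conv_lhs => rw [hsplit]
    rw [List.count_append]
  rw [List.count_cons_self, h3, h1, h2]
  omega

-- count of a non-head value of a sorted list survives into the dropped suffix
lemma count_tail_sorted (v : Int) (t : List Int) (x : Int) (hx : x ≠ v)
    (hs : (v :: t).Pairwise (· ≤ ·)) :
    (v :: t).count x = (t.dropWhile (fun z => z == v)).count x := by
  have htake : ∀ y ∈ t.takeWhile (fun z => z == v), y = v := by
    intro y hy; simpa using List.mem_takeWhile_imp hy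
  have hsplit : t = t.takeWhile (fun y => y == v) ++ t.dropWhile (fun y => y == v) :=
    (t.takeWhile_append_dropWhile).symm
  have h1 : (t.takeWhile (fun y => y == v)).count x = 0 :=
    List.count_eq_zero.mpr (fun hmem' => hx (htake x hmem'))
  have h3 : t.count x = (t.takeWhile (fun y => y == v)).count x +
      (t.dropWhile (fun y => y == v)).count x := by
    conv_lhs => rw [hsplit]
    rw [List.count_append]
  have h0 : (v :: t).count x = t.count x := by
    simp [List.count_cons]
    omega
  rw [h0, h3, h1]
  omega

-- run lengths of a sorted list are the element counts
lemma mem_pvRunsOf (s : List Int) (hs : s.Pairwise (· ≤ ·)) (x : Int) (c : Int) :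
    (x, c) ∈ pvRunsOf s → x ∈ s ∧ c = (s.count x : Int) := by
  induction hn : s.length using Nat.strong_induction_on generalizing s with
  | _ n ih =>
    cases s with
    | nil => simp [pvRunsOf]
    | cons v t =>
      intro hmem
      rw [pvRunsOf] at hmem
      rcases List.mem_cons.mp hmem with heq | htail
      · injection heq with h1 h2
        refine ⟨by simp [h1], ?_⟩
        rw [h1, count_head_sorted v t hs, h2]
        push_cast; ring
      · have hr : (t.dropWhile (fun z => z == v)).Pairwise (· ≤ ·) :=
          hs.of_cons.sublist (t.dropWhile_sublist _)
        have hlt : (t.dropWhile (fun z => z == v)).length < n := by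
          have := t.length_dropWhile_le (fun z => z == v)
          simp at hn; omega
        obtain ⟨hxmem, hxc⟩ := ih _ hlt _ hr rfl htail
        have hxv : v < x := gt_of_mem_dropWhile v t hs x hxmem
        refine ⟨List.mem_cons_of_mem _ ((t.dropWhile_sublist _).mem hxmem), ?_⟩
        rw [count_tail_sorted v t x (by omega) hs, hxc]

lemma pvRunsOf_complete (s : List Int) (hs : s.Pairwise (· ≤ ·)) (x : Int) :
    x ∈ s → (x, (s.count x : Int)) ∈ pvRunsOf s := by
  induction hn : s.length using Nat.strong_induction_on generalizing s with
  | _ n ih =>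
    cases s with
    | nil => simp
    | cons v t =>
      intro hmem
      by_cases hx : x = v
      · rw [pvRunsOf]
        refine List.mem_cons.mpr (Or.inl ?_)
        rw [hx, count_head_sorted v t hs]
        push_cast; ring_nf
      · have htake : ∀ y ∈ t.takeWhile (fun z => z == v), y = v := by
          intro y hy; simpa using List.mem_takeWhile_imp hy
        have hsplit : t = t.takeWhile (fun y => y == v) ++ t.dropWhile (fun y => y == v) :=
          (t.takeWhile_append_dropWhile).symm
        have hxt : x ∈ t := by
          rcases List.mem_cons.mp hmem with h | h
          · exact absurd h hx
          · exact h
        have hxd : x ∈ t.dropWhile (fun z => z == v) := by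
          rcases (List.mem_append.mp (hsplit ▸ hxt)) with h | h
          · exact absurd (htake x h) hx
          · exact h
        have hr : (t.dropWhile (fun z => z == v)).Pairwise (· ≤ ·) :=
          hs.of_cons.sublist (t.dropWhile_sublist _)
        have hlt : (t.dropWhile (fun z => z == v)).length < n := by
          have := t.length_dropWhile_le (fun z => z == v)
          simp at hn; omega
        have htl := ih _ hlt _ hr rfl hxd
        rw [pvRunsOf, count_tail_sorted v t x hx hs]
        exact List.mem_cons_of_mem _ htl

-- ===== VERDICT (by name: the statement is the Claim_ definition above) =====
theorem most_constrained_spec : Claim_equal_most_constrained := by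
  intro difference buttons _ hpre
  unfold Spec_most_constrained most_constrained most_constrained_alt
  simp only [countsA_eq_counter, List.flatMap_id', PySem.List.dedup_eq_ofList]
  set flat := buttons.flatten with hflat
  set s := PySem.List.sorted flat (fun x => x) false with hsdef
  have hperm : s.Perm flat := PySem.List.sorted_perm flat (fun x => x) false
  have hsorted : s.Pairwise (· ≤ ·) := by
    simpa using PySem.List.sorted_pairwise flat (fun x => x)
  have hcount : ∀ x, s.count x = flat.count x := fun x => hperm.count_eq x
  have hmemiff : ∀ x, x ∈ s ↔ x ∈ flat := fun x => hperm.mem_iff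
  have hvals : (PySem.Dict.counter flat).values
      = (PySem.Set.ofList flat).map (fun x => (flat.count x : Int)) := by
    simp [PySem.Dict.values, PySem.Dict.items_counter, Function.comp]
  rw [hvals]
  -- both minimum candidates exist
  have hsne : s ≠ [] := by
    intro h
    exact hpre (List.Perm.eq_nil (h ▸ hperm).symm)
  have hAne : (PySem.Set.ofList flat).map (fun x => (flat.count x : Int)) ≠ [] := by
    obtain ⟨x, hx⟩ := List.exists_mem_of_ne_nil _ hpre
    intro h
    have : x ∈ PySem.Set.ofList flat := (PySem.Set.mem_ofList _ _).mpr hx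
    rw [List.map_eq_nil_iff.mp h] at this
    exact absurd this List.not_mem_nil
  have hBne : (pvRunsOf s).map Prod.snd ≠ [] := by
    obtain ⟨x, hx⟩ := List.exists_mem_of_ne_nil _ hsne
    have := pvRunsOf_complete s hsorted x hx
    intro h
    rw [List.map_eq_nil_iff.mp h] at this
    exact absurd this List.not_mem_nil
  obtain ⟨mA, hmA⟩ := Option.ne_none_iff_exists'.mp
    (fun h => hAne ((PySem.List.min?_eq_none_iff ((PySem.Set.ofList flat).map (fun x => (flat.count x : Int))) (fun v => (v : Int))).mp h))
  obtain ⟨mB, hmB⟩ := Option.ne_none_iff_exists'.mp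
    (fun h => hBne ((PySem.List.min?_eq_none_iff ((pvRunsOf s).map Prod.snd) (fun v => (v : Int))).mp h))
  -- the two value lists have the same members, so the two minima coincide
  have hmemA : ∀ y, y ∈ (PySem.Set.ofList flat).map (fun x => (flat.count x : Int)) →
      y ∈ (pvRunsOf s).map Prod.snd := by
    intro y hy
    obtain ⟨x, hx, rfl⟩ := List.mem_map.mp hy
    have hxf : x ∈ flat := (PySem.Set.mem_ofList _ _).mp hx
    have := pvRunsOf_complete s hsorted x ((hmemiff x).mpr hxf)
    exact List.mem_map.mpr ⟨(x, (s.count x : Int)), this, by simp [hcount x]⟩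
  have hmemB : ∀ y, y ∈ (pvRunsOf s).map Prod.snd →
      y ∈ (PySem.Set.ofList flat).map (fun x => (flat.count x : Int)) := by
    intro y hy
    obtain ⟨⟨x, c⟩, hxc, rfl⟩ := List.mem_map.mp hy
    obtain ⟨hxs, hc⟩ := mem_pvRunsOf s hsorted x c hxc
    refine List.mem_map.mpr ⟨x, (PySem.Set.mem_ofList _ _).mpr ((hmemiff x).mp hxs), ?_⟩
    simp [hc, hcount x]
  have hm : mA = mB := by
    have h1 := PySem.List.min?_isMin hmA mB (hmemB mB (PySem.List.min?_mem hmB))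
    have h2 := PySem.List.min?_isMin hmB mA (hmemA mA (PySem.List.min?_mem hmA))
    omega
  rw [hmA, hmB, ← hm]
  -- equal filters over the same deduplicated key list
  have hpred : ∀ x ∈ PySem.Set.ofList flat,
      PySem.Set.contains (PySem.Set.ofList
          (((pvRunsOf s).filter (fun vc => vc.2 == mA)).map Prod.fst)) x
      = ((flat.count x : Int) == mA) := by
    intro x hx
    have hxf : x ∈ flat := (PySem.Set.mem_ofList _ _).mp hx
    by_cases hcase : (flat.count x : Int) = mA
    · have hmem : (x, (s.count x : Int)) ∈ pvRunsOf s :=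
        pvRunsOf_complete s hsorted x ((hmemiff x).mpr hxf)
      have hmf : x ∈ ((pvRunsOf s).filter (fun vc => vc.2 == mA)).map Prod.fst :=
        List.mem_map.mpr ⟨(x, (s.count x : Int)),
          List.mem_filter.mpr ⟨hmem, by simp [hcount x, hcase]⟩, rfl⟩
      have hmem' := (PySem.Set.mem_ofList
        (((pvRunsOf s).filter (fun vc => vc.2 == mA)).map Prod.fst) x).mpr hmf
      simp [PySem.Set.contains, hmem', hcase]
    · have hno : x ∉ ((pvRunsOf s).filter (fun vc => vc.2 == mA)).map Prod.fst := by
        intro hmem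
        obtain ⟨⟨x', c⟩, hx', hfst⟩ := List.mem_map.mp hmem
        obtain ⟨hin, hbeq⟩ := List.mem_filter.mp hx'
        obtain ⟨_, hc⟩ := mem_pvRunsOf s hsorted x' c hin
        simp at hbeq hfst
        rw [hfst] at hc
        rw [hc, hcount] at hbeq
        exact hcase hbeq
      have hno' : x ∉ PySem.Set.ofList
          (((pvRunsOf s).filter (fun vc => vc.2 == mA)).map Prod.fst) := by
        intro h; exact hno ((PySem.Set.mem_ofList _ _).mp h)
      simp [PySem.Set.contains, hno', hcase]
  calc ((PySem.Dict.counter flat).items.filter (fun kv => kv.2 == mA)).map Prod.fst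
      = (PySem.Set.ofList flat).filter (fun k => (flat.count k : Int) == mA) := by
        simp only [PySem.Dict.items_counter, List.filter_map]
        simp [Function.comp_def]
    _ = (PySem.Set.ofList flat).filter (fun x => PySem.Set.contains (PySem.Set.ofList
          (((pvRunsOf s).filter (fun vc => vc.2 == mA)).map Prod.fst)) x) :=
        (List.filter_congr hpred).symm
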